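-- pv_equiv track=rewrite | github.com/vacontinuejatotired/Network-Encoding-Simulator | src/method/dedoce.py | encode_manchester_to_signal
-- ===== SOURCE A (Python) =====
-- def encode_manchester_to_signal(data, sample_nums=10):
--     """曼彻斯特编码，返回采样电平列表（0=上升沿，1=下降沿）"""
--     signal = []  # 准备空列表
--
--     # 计算半比特采样点数
--     half = sample_nums // 2
--
--     # 处理奇偶：如果总采样点是奇数，前半段多一个点
--     if sample_nums % 2 == 1:
--         first_half = half + 1
--         second_half = half
--     else:
--         first_half = half
--         second_half = half
--
--     # 遍历每个比特
--     for bit in data: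
--         if bit == 1:
--             # 1是下降沿：前半高(1)，后半低(0)
--             signal.extend([1] * first_half)
--             signal.extend([0] * second_half)
--         else:
--             # 0是上升沿：前半低(0)，后半高(1)
--             signal.extend([0] * first_half)
--             signal.extend([1] * second_half)
--
--     # 返回电平列表
--     return signal
-- ===== SOURCE B (Python) =====
-- def encode_manchester_to_signal(data, sample_nums=10):
--     """曼彻斯特编码，返回采样电平列表（0=上升沿，1=下降沿）"""
--     data = list(data)
--     half = sample_nums // 2
--     first_half = half + 1 if sample_nums % 2 == 1 else half
--     levels = []
--     for i in range(len(data) * sample_nums):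
--         bit = data[i // sample_nums]
--         p = i % sample_nums
--         if bit == 1:
--             levels.append(1 if p < first_half else 0)
--         else:
--             levels.append(0 if p < first_half else 1)
--     return levels
-- ===== Notes on version B (the rewrite author's own statement) =====
-- stated objective: alternative
-- what changed: Replaces the per-bit nested extend loop with a single flat pass over every output sample index, deriving each level arithmetically from i // sample_nums and i % sample_nums.
import Mathlib
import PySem

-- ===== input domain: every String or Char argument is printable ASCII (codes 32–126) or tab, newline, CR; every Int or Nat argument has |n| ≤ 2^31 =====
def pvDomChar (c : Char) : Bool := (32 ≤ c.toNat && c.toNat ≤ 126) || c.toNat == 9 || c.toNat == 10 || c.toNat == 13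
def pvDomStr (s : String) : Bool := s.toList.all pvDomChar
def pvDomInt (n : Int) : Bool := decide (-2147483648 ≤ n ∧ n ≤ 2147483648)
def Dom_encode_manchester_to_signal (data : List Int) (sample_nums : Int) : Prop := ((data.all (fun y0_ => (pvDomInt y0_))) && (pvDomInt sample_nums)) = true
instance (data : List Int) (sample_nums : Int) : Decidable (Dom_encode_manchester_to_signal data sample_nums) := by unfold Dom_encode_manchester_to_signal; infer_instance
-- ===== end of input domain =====

-- B replaces A's per-bit nested extend loop by a single flat pass over every output sample
-- index, deriving each level from i // sample_nums and i % sample_nums (alternative decomposition, same cost).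

-- ===== PORT A =====
-- literal port of Source A: '[1] * n' with an Int n is List.replicate n.toNat 1 (n ≤ 0 gives []).
def encode_manchester_to_signal (data : List Int) (sample_nums : Int) : List Int :=
  let half := PySem.Int.floordiv sample_nums 2
  let first_half := if PySem.Int.mod sample_nums 2 = 1 then half + 1 else half
  let second_half := half   -- both branches of the Python if assign second_half = half
  data.foldl (fun signal bit =>
    if bit = 1 then
      (signal ++ List.replicate first_half.toNat 1) ++ List.replicate second_half.toNat 0
    else
      (signal ++ List.replicate first_half.toNat 0) ++ List.replicate second_half.toNat 1) []

-- ===== PORT B =====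
-- literal port of Source B; data[i // sample_nums] is always in range in Source B's loop, ported as pyGetD.
def encode_manchester_to_signal_alt (data : List Int) (sample_nums : Int) : List Int :=
  let half := PySem.Int.floordiv sample_nums 2
  let first_half := if PySem.Int.mod sample_nums 2 = 1 then half + 1 else half
  (PySem.List.pyRange 0 ((data.length : Int) * sample_nums) 1).foldl
    (fun signal i =>
      let bit := PySem.List.pyGetD data (PySem.Int.floordiv i sample_nums) 0
      let p := PySem.Int.mod i sample_nums
      signal ++ [if bit = 1 then (if p < first_half then 1 else 0)
                 else (if p < first_half then 0 else 1)]) []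

-- ===== PRECONDITION & SPEC =====
def Spec_encode_manchester_to_signal (data : List Int) (sample_nums : Int) (out : List Int) : Prop := out = encode_manchester_to_signal_alt data sample_nums
instance (data : List Int) (sample_nums : Int) (out : List Int) : Decidable (Spec_encode_manchester_to_signal data sample_nums out) := by unfold Spec_encode_manchester_to_signal; infer_instance

-- ===== CLAIM (what is proved, stated in full; the proofs are below) =====
def Claim_equal_encode_manchester_to_signal : Prop := ∀ (data : List Int) (sample_nums : Int), Dom_encode_manchester_to_signal data sample_nums → Spec_encode_manchester_to_signal data sample_nums (encode_manchester_to_signal data sample_nums)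

-- ===== LEMMAS AND PROOFS =====

-- per-bit Manchester block, as A builds it
def mBlock (fh sh : Int) (bit : Int) : List Int :=
  if bit = 1 then List.replicate fh.toNat 1 ++ List.replicate sh.toNat 0
  else List.replicate fh.toNat 0 ++ List.replicate sh.toNat 1

-- per-sample level, as B computes it
def mSamp (fh : Int) (xs : List Int) (s : Int) (i : Int) : Int :=
  let bit := PySem.List.pyGetD xs (PySem.Int.floordiv i s) 0
  let p := PySem.Int.mod i s
  if bit = 1 then (if p < fh then 1 else 0) else (if p < fh then 0 else 1)

theorem foldA (fh sh : Int) (xs acc : List Int) :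
    xs.foldl (fun signal bit =>
      if bit = 1 then
        (signal ++ List.replicate fh.toNat 1) ++ List.replicate sh.toNat 0
      else
        (signal ++ List.replicate fh.toNat 0) ++ List.replicate sh.toNat 1) acc
    = acc ++ xs.flatMap (mBlock fh sh) := by
  induction xs generalizing acc with
  | nil => simp
  | cons b t ih =>
    simp only [List.foldl_cons, List.flatMap_cons, ih, mBlock]
    by_cases hb : b = 1 <;> simp [hb, List.append_assoc]

theorem rif (s fh : Int) (h0 : 0 ≤ fh) (hle : fh ≤ s) (x y : Int) :
    (List.range s.toNat).map (fun (m : ℕ) => if (m : Int) < fh then x else y)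
    = List.replicate fh.toNat x ++ List.replicate (s - fh).toNat y := by
  apply List.ext_getElem
  · simp; omega
  · intro i h1 h2
    simp only [List.getElem_map, List.getElem_range, List.getElem_append,
      List.length_replicate, List.getElem_replicate]
    by_cases hi : i < fh.toNat
    · rw [if_pos (by omega : ((i : ℕ) : Int) < fh), dif_pos hi]
    · rw [if_neg (by omega : ¬ ((i : ℕ) : Int) < fh), dif_neg hi]

theorem mainLoop (s fh sh : Int) (hs : 0 < s) (h0 : 0 ≤ fh) (hle : fh ≤ s) (hsh : sh = s - fh)
    (suf : List Int) :
    ∀ (k : ℕ) (xs : List Int), xs.drop k = suf →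
      (PySem.List.pyRange ((k : Int) * s) ((xs.length : Int) * s) 1).map (mSamp fh xs s)
      = suf.flatMap (mBlock fh sh) := by
  induction suf with
  | nil =>
    intro k xs hd
    have hk : xs.length ≤ k := by
      have := List.drop_eq_nil_iff.mp hd
      omega
    rw [PySem.List.pyRange_one_eq_nil
      (by exact mul_le_mul_of_nonneg_right (by exact_mod_cast hk) hs.le)]
    simp
  | cons b t ih =>
    intro k xs hd
    have hklen : k < xs.length := by
      by_contra h
      rw [List.drop_eq_nil_iff.mpr (by omega)] at hd
      simp at hd
    have hget : xs[k] = b := by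
      have h0' : (xs.drop k)[0]'(by rw [hd]; simp) = b := by simp [hd]
      rw [List.getElem_drop] at h0'
      simpa using h0'
    have hstep : ((k : Int) + 1) * s = (k : Int) * s + s := by ring
    have hsplit : PySem.List.pyRange ((k : Int) * s) ((xs.length : Int) * s) 1
        = PySem.List.pyRange ((k : Int) * s) (((k : Int) + 1) * s) 1
          ++ PySem.List.pyRange (((k : Int) + 1) * s) ((xs.length : Int) * s) 1 := by
      refine PySem.List.pyRange_one_append _ _ _ (by linarith) ?_
      have hk1 : (k : Int) + 1 ≤ (xs.length : Int) := by exact_mod_cast hklen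
      nlinarith
    have hdk1 : xs.drop (k + 1) = t := by
      have h := List.drop_drop (i := 1) (j := k) (l := xs)
      rw [hd] at h
      simpa using h.symm
    have hih := ih (k + 1) xs hdk1
    have hblock : (PySem.List.pyRange ((k : Int) * s) (((k : Int) + 1) * s) 1).map (mSamp fh xs s)
        = mBlock fh sh b := by
      rw [PySem.List.pyRange_one, List.map_map]
      have hsub : (((k : Int) + 1) * s - (k : Int) * s) = s := by ring
      rw [hsub]
      have hpt : ∀ m ∈ List.range s.toNat,
          (mSamp fh xs s ∘ fun (m : ℕ) => (k : Int) * s + (m : Int)) m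
          = (fun (m : ℕ) => if b = 1 then (if (m : Int) < fh then 1 else 0)
                      else (if (m : Int) < fh then 0 else 1)) m := by
        intro j hj
        have hjs : (j : Int) < s := by
          have := List.mem_range.mp hj; omega
        have hj0 : (0 : Int) ≤ (j : Int) := Int.natCast_nonneg j
        have hfd : PySem.Int.floordiv ((k : Int) * s + (j : Int)) s = (k : Int) := by
          rw [PySem.Int.floordiv_eq_iff_of_pos hs]
          exact ⟨by linarith, by linarith⟩
        have hmod : PySem.Int.mod ((k : Int) * s + (j : Int)) s = (j : Int) := by
          have h := PySem.Int.floordiv_mul_add_mod ((k : Int) * s + (j : Int)) s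
          rw [hfd] at h
          linarith
        simp only [Function.comp, mSamp, hfd, hmod, PySem.List.pyGetD_natCast,
          List.getD_eq_getElem?_getD, List.getElem?_eq_getElem hklen, hget, Option.getD_some]
      rw [List.map_congr_left hpt]
      by_cases hb : b = 1
      · simp only [mBlock, hb, reduceIte]
        rw [hsh]
        exact rif s fh h0 hle 1 0
      · simp only [mBlock, hb, reduceIte]
        rw [hsh]
        exact rif s fh h0 hle 0 1
    have hih' : (PySem.List.pyRange (((k : Int) + 1) * s) ((xs.length : Int) * s) 1).map
        (mSamp fh xs s) = t.flatMap (mBlock fh sh) := by exact_mod_cast hih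
    rw [hsplit, List.map_append, hblock, hih', List.flatMap_cons]

-- ===== VERDICT (by name: the statement is the Claim_ definition above) =====
theorem encode_manchester_to_signal_spec : Claim_equal_encode_manchester_to_signal := by
  intro data s _
  unfold Spec_encode_manchester_to_signal
  have hq := PySem.Int.floordiv_mul_add_mod s 2
  have hm0 : 0 ≤ PySem.Int.mod s 2 := PySem.Int.mod_nonneg s (by omega)
  have hm2 : PySem.Int.mod s 2 < 2 := PySem.Int.mod_lt s (by omega)
  have hA : encode_manchester_to_signal data s
      = data.flatMap (mBlock (if PySem.Int.mod s 2 = 1 then PySem.Int.floordiv s 2 + 1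
          else PySem.Int.floordiv s 2) (PySem.Int.floordiv s 2)) := by
    have h := foldA (if PySem.Int.mod s 2 = 1 then PySem.Int.floordiv s 2 + 1
      else PySem.Int.floordiv s 2) (PySem.Int.floordiv s 2) data []
    rw [List.nil_append] at h
    exact h
  have hAlt : encode_manchester_to_signal_alt data s
      = (PySem.List.pyRange 0 ((data.length : Int) * s) 1).map
          (mSamp (if PySem.Int.mod s 2 = 1 then PySem.Int.floordiv s 2 + 1
            else PySem.Int.floordiv s 2) data s) := by
    have h := PySem.List.foldl_append_singleton_eq_map
      (f := mSamp (if PySem.Int.mod s 2 = 1 then PySem.Int.floordiv s 2 + 1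
        else PySem.Int.floordiv s 2) data s)
      (l := PySem.List.pyRange 0 ((data.length : Int) * s) 1) (acc := [])
    rw [List.nil_append] at h
    exact h
  set half := PySem.Int.floordiv s 2 with hhalf
  set F := (if PySem.Int.mod s 2 = 1 then half + 1 else half) with hF
  rw [hA, hAlt]
  by_cases hs : 0 < s
  · have hF0 : 0 ≤ F := by
      by_cases hc : PySem.Int.mod s 2 = 1 <;> simp only [hF, hc, reduceIte] <;> omega
    have hFle : F ≤ s := by
      by_cases hc : PySem.Int.mod s 2 = 1 <;> simp only [hF, hc, reduceIte] <;> omega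
    have hsh : half = s - F := by
      by_cases hc : PySem.Int.mod s 2 = 1 <;> simp only [hF, hc, reduceIte] <;> omega
    have h := mainLoop s F half hs hF0 hFle hsh data 0 data (by simp)
    simp only [Nat.cast_zero, zero_mul] at h
    exact h.symm
  · have hlen : (data.length : Int) * s ≤ 0 :=
      mul_nonpos_iff.mpr (Or.inl ⟨Int.natCast_nonneg _, by omega⟩)
    rw [PySem.List.pyRange_one_eq_nil hlen]
    simp only [List.map_nil]
    rw [List.flatMap_eq_nil_iff]
    intro b _
    have hF0 : F ≤ 0 := by
      by_cases hc : PySem.Int.mod s 2 = 1 <;> simp only [hF, hc, reduceIte] <;> omega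
    have hH0 : half ≤ 0 := by omega
    simp [mBlock, Int.toNat_of_nonpos hF0, Int.toNat_of_nonpos hH0]
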